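-- pv_equiv track=rewrite | github.com/ASSERT-KTH/Mokav | experiments/c4b/BADT/iteration-10-sample-10-temp-1/generated_tests/2555/54477/temp_bug_qb.py | original_func
-- ===== SOURCE A (Python) =====
-- def original_func(*args):
-- 	global_list = []
--
-- 	line = args[0]
-- 	result = 0
-- 	maxi = 1
-- 	for x in range(1, len(line)):
-- 	    if (line[x] == line[(x - 1)]):
-- 	        maxi += 1
-- 	        if (maxi > result):
-- 	            result = maxi
-- 	    else:
-- 	        if (maxi > result):
-- 	            result = maxi
-- 	        maxi = 1
-- 	if (result >= 7):
-- 	    global_list.append('Yes')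
-- 	else:
-- 	    global_list.append('No')
-- 	return global_list
-- ===== SOURCE B (Python) =====
-- def _run_lengths(seq):
--     # run-length encode: lengths of the maximal runs of consecutive equal elements
--     if not seq:
--         return []
--     lengths = []
--     prev, k = seq[0], 1
--     for ch in seq[1:]:
--         if ch == prev:
--             k += 1
--         else:
--             lengths.append(k)
--             prev, k = ch, 1
--     lengths.append(k)
--     return lengths
--
--
-- def original_func(*args):
--     line = args[0]
--     longest = max(_run_lengths(line), default=0)
--     return ['Yes'] if longest >= 7 else ['No']
-- ===== Notes on version B (the rewrite author's own statement) =====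
-- stated objective: idiomatic
-- what changed: B materialises the run-length encoding of the line (group lengths) and takes max(..., default=0), replacing A's inline counter/running-max tracking with its quirky conditional updates.
import Mathlib
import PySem

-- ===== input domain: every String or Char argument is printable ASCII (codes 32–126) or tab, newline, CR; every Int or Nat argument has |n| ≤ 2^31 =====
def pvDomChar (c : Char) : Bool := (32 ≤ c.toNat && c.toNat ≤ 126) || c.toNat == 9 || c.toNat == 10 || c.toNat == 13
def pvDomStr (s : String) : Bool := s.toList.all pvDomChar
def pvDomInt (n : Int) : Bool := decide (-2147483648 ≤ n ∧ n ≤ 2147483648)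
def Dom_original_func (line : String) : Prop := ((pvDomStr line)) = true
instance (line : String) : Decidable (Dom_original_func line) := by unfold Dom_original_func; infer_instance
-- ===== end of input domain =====

-- B replaces A's inline counter/running-max loop by materialising the run-length
-- encoding of the line and taking max(lengths, default=0) (idiomatic; same O(n) cost).


-- ===== PORT A =====
-- for x in range(1, len(line)): indices x and x-1 are always in range, so pyGetD is exact there
def original_func (line : String) : List String :=
  if ((PySem.List.pyRange 1 (PySem.Str.len line) 1).foldl
      (fun (st : Int × Int) (x : Int) =>
        if PySem.List.pyGetD line.toList x ' ' == PySem.List.pyGetD line.toList (x - 1) ' ' then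
          (if st.2 + 1 > st.1 then st.2 + 1 else st.1, st.2 + 1)
        else
          (if st.2 > st.1 then st.2 else st.1, 1))
      ((0 : Int), (1 : Int))).1 ≥ 7 then ["Yes"] else ["No"]

-- ===== PORT B =====
-- the loop of _run_lengths over seq[1:] with state (prev, k), accumulating the group lengths
def runLengthsAux (p : Char) (k : Int) : List Char → List Int
  | [] => [k]
  | c :: t => if c == p then runLengthsAux p (k + 1) t else k :: runLengthsAux c 1 t

def runLengths (l : List Char) : List Int :=
  match l with
  | [] => []
  | c :: t => runLengthsAux c 1 t

def original_func_alt (line : String) : List String :=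
  if PySem.List.maxD (runLengths line.toList) (fun x => x) 0 ≥ 7 then ["Yes"] else ["No"]

-- ===== PRECONDITION & SPEC =====
def Spec_original_func (line : String) (out : List String) : Prop := out = original_func_alt line
instance (line : String) (out : List String) : Decidable (Spec_original_func line out) := by unfold Spec_original_func; infer_instance

-- ===== CLAIM (what is proved, stated in full; the proofs are below) =====
def Claim_equal_original_func : Prop := ∀ (line : String), Dom_original_func line → Spec_original_func line (original_func line)

-- ===== LEMMAS AND PROOFS =====

-- the longest-run value both programs are about: max run length of (replicate m p ++ rest)
def maxRunAux (p : Char) (m : Int) : List Char → Int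
  | [] => m
  | c :: t => if c == p then maxRunAux p (m + 1) t else max m (maxRunAux c 1 t)

-- structural form of A's loop body (state (result, maxi), previous char p)
def loopA (r m : Int) (p : Char) : List Char → Int
  | [] => r
  | c :: t =>
      if c == p then loopA (if m + 1 > r then m + 1 else r) (m + 1) c t
      else loopA (if m > r then m else r) 1 c t

theorem le_maxRunAux (t : List Char) : ∀ (p : Char) (m : Int), m ≤ maxRunAux p m t := by
  induction t with
  | nil => intro p m; simp [maxRunAux]
  | cons c t ih =>
      intro p m
      simp only [maxRunAux]
      split
      · exact le_trans (by omega : m ≤ m + 1) (ih p (m + 1))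
      · exact le_max_left _ _

-- A's range-indexed fold equals the structural loop
theorem bridgeA (l : List Char) : ∀ (k i : Nat) (r m : Int), k = l.length - i → 1 ≤ i → i ≤ l.length →
    ((PySem.List.pyRange (i : Int) (l.length : Int) 1).foldl
      (fun (st : Int × Int) (x : Int) =>
        if PySem.List.pyGetD l x ' ' == PySem.List.pyGetD l (x - 1) ' ' then
          (if st.2 + 1 > st.1 then st.2 + 1 else st.1, st.2 + 1)
        else
          (if st.2 > st.1 then st.2 else st.1, 1))
      (r, m)).1
    = loopA r m (l.getD (i - 1) ' ') (l.drop i) := by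
  intro k
  induction k with
  | zero =>
      intro i r m hk h1 h2
      have hi : i = l.length := by omega
      subst hi
      rw [PySem.List.pyRange_one_eq_nil (by omega)]
      simp [loopA]
  | succ k ih =>
      intro i r m hk h1 h2
      have hi : i < l.length := by omega
      rw [PySem.List.pyRange_one_cons (by exact_mod_cast hi)]
      simp only [List.foldl_cons]
      have hx1 : ((i : Int) - 1) = ((i - 1 : Nat) : Int) := by omega
      have hget : PySem.List.pyGetD l (i : Int) ' ' = l.getD i ' ' := by
        simp [PySem.List.pyGetD_natCast]
      have hget' : PySem.List.pyGetD l ((i : Int) - 1) ' ' = l.getD (i - 1) ' ' := by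
        rw [hx1]; simp [PySem.List.pyGetD_natCast]
      have hdrop : l.drop i = l[i] :: l.drop (i + 1) := List.drop_eq_getElem_cons hi
      have hgetD : l.getD i ' ' = l[i] := by
        simp [List.getD_eq_getElem?_getD, List.getElem?_eq_getElem hi]
      have hcast : ((i : Int) + 1) = ((i + 1 : Nat) : Int) := by omega
      rw [hget, hget', hgetD, hdrop]
      simp only [loopA]
      split
      · rw [hcast, ih (i + 1) _ _ (by omega) (by omega) (by omega)]
        simp [List.getElem?_eq_getElem hi]
      · rw [hcast, ih (i + 1) _ _ (by omega) (by omega) (by omega)]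
        simp [List.getElem?_eq_getElem hi]

-- in a reachable state (1 ≤ m ≤ r) A's loop computes max r (longest run)
theorem loopA_eq (t : List Char) : ∀ (p : Char) (r m : Int), 1 ≤ m → m ≤ r →
    loopA r m p t = max r (maxRunAux p m t) := by
  induction t with
  | nil => intro p r m h1 h2; simp only [loopA, maxRunAux]; omega
  | cons c t ih =>
      intro p r m h1 h2
      simp only [loopA, maxRunAux, beq_iff_eq]
      by_cases hc : c = p
      · rw [if_pos hc, if_pos hc]
        have hm := le_maxRunAux t c (m + 1)
        have heq : (if m + 1 > r then m + 1 else r) = max r (m + 1) := by omega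
        rw [heq, ih c (max r (m + 1)) (m + 1) (by omega) (by omega)]
        subst hc
        omega
      · rw [if_neg hc, if_neg hc]
        have heq : (if m > r then m else r) = r := by omega
        have hm := le_maxRunAux t c 1
        rw [heq, ih c r 1 (by omega) (by omega)]
        omega

-- from the initial state, on a nonempty tail, A's loop IS the longest run
theorem loopA_init (c : Char) (d : Char) (t : List Char) :
    loopA 0 1 c (d :: t) = maxRunAux c 1 (d :: t) := by
  simp only [loopA, maxRunAux, beq_iff_eq]
  by_cases hc : d = c
  · rw [if_pos hc, if_pos hc, if_pos (by omega : (1 : Int) + 1 > 0)]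
    subst hc
    rw [loopA_eq t d (1 + 1) (1 + 1) (by omega) (by omega)]
    have hm := le_maxRunAux t d (1 + 1)
    omega
  · rw [if_neg hc, if_neg hc, if_pos (by omega : (1 : Int) > 0)]
    rw [loopA_eq t d 1 1 (by omega) (by omega)]

-- B's run-length list is never empty, and folding max over it yields the longest run
theorem runLengthsAux_ne_nil (t : List Char) : ∀ (p : Char) (k : Int), runLengthsAux p k t ≠ [] := by
  induction t with
  | nil => intro p k; simp [runLengthsAux]
  | cons c t ih =>
      intro p k
      simp only [runLengthsAux]
      split
      · exact ih p (k + 1)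
      · simp

theorem foldl_max_max (l : List Int) : ∀ (a b : Int), l.foldl max (max a b) = max a (l.foldl max b) := by
  induction l with
  | nil => intro a b; rfl
  | cons c t ih =>
      intro a b
      simp only [List.foldl_cons, max_assoc, ih]

theorem tailfold (t : List Char) : ∀ (p : Char) (k : Int),
    (runLengthsAux p k t).tail.foldl max ((runLengthsAux p k t).headD 0) = maxRunAux p k t := by
  induction t with
  | nil => intro p k; simp [runLengthsAux, maxRunAux]
  | cons c t ih =>
      intro p k
      simp only [runLengthsAux, maxRunAux, beq_iff_eq]
      by_cases hc : c = p
      · rw [if_pos hc, if_pos hc]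
        exact ih p (k + 1)
      · rw [if_neg hc, if_neg hc]
        obtain ⟨y, ys, hys⟩ := List.exists_cons_of_ne_nil (runLengthsAux_ne_nil t c 1)
        have h := ih c 1
        rw [hys] at h ⊢
        simp only [List.tail_cons, List.headD_cons] at h ⊢
        calc (y :: ys).foldl max k = ys.foldl max (max k y) := by simp [List.foldl_cons]
          _ = max k (ys.foldl max y) := foldl_max_max ys k y
          _ = max k (maxRunAux c 1 t) := by rw [h]

theorem original_func_spec : Claim_equal_original_func := by
  unfold Claim_equal_original_func
  intro line _
  unfold Spec_original_func original_func original_func_alt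
  cases hl : line.toList with
  | nil =>
      rw [PySem.Str.len_eq, hl]
      rw [PySem.List.pyRange_one_eq_nil (by simp)]
      simp [runLengths, PySem.List.maxD, PySem.List.max?]
  | cons c t =>
      rw [PySem.Str.len_eq, hl]
      have hb := bridgeA (c :: t) ((c :: t).length - 1) 1 0 1 rfl (by omega) (by simp)
      simp only [Nat.cast_one, show (1:Nat)-1 = 0 from rfl, List.getD_cons_zero, List.drop_one,
        List.tail_cons] at hb
      rw [hb]
      have hmax : PySem.List.maxD (runLengths (c :: t)) (fun x => x) 0 = maxRunAux c 1 t := by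
        obtain ⟨y, ys, hys⟩ := List.exists_cons_of_ne_nil (runLengthsAux_ne_nil t c 1)
        have h := tailfold t c 1
        rw [hys] at h
        simp only [List.tail_cons, List.headD_cons] at h
        simp only [runLengths, hys, PySem.List.maxD, PySem.List.max?_id_cons, Option.getD_some]
        exact h
      rw [hmax]
      cases t with
      | nil => norm_num [loopA, maxRunAux]
      | cons d t' => rw [loopA_init c d t']
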